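-- pv_equiv track=rewrite | github.com/dandiez/AdventOfCode | 2019/day_16/solution.py | generate_output_signal
-- ===== SOURCE A (Python) =====
-- import itertools
--
-- def generate_base_cyclic_pattern_for_row(row):
--     base_pattern = (0, 1, 0, -1)
--     repeat_times = row + 1
--     for value in itertools.cycle(base_pattern):
--         for _ in range(repeat_times):
--             yield value
--
-- def generate_repeating_pattern(row, length):
--     base = generate_base_cyclic_pattern_for_row(row)
--     next(base)  # consume first element
--     value = next(base)
--     for _ in range(length):
--         yield value
--         value = next(base)
--
-- def generate_output_signal(signal, length):
--     signal_orig = signal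
--     for row in range(length):
--         signal_clone, signal_orig = itertools.tee(signal_orig)
--         row_sum = 0
--         for n, factor in zip(signal_clone, generate_repeating_pattern(row, length)):
--             row_sum += n*factor
--         yield row_sum
-- ===== SOURCE B (Python) =====
-- def generate_output_signal(signal_, length):
--     sig = list(signal_)
--     m = min(len(sig), max(length, 0))
--     prefix = [0]
--     acc = 0
--     for x in sig[:m]:
--         acc += x
--         prefix.append(acc)
--     out = []
--     for row in range(length):
--         rep = row + 1
--         start = rep - 1
--         sign = 1
--         s = 0
--         while start < m:
--             e = min(start + rep, m)
--             s += sign * (prefix[e] - prefix[start])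
--             sign = -sign
--             start += 2 * rep
--         out.append(s)
--     return out
-- ===== Notes on version B (the rewrite author's own statement) =====
-- stated objective: faster
-- what changed: Instead of regenerating the cyclic pattern and scanning the whole signal for every output row, B builds one prefix-sum array and computes each row as a few signed range differences over the pattern's nonzero blocks.
import Mathlib
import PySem

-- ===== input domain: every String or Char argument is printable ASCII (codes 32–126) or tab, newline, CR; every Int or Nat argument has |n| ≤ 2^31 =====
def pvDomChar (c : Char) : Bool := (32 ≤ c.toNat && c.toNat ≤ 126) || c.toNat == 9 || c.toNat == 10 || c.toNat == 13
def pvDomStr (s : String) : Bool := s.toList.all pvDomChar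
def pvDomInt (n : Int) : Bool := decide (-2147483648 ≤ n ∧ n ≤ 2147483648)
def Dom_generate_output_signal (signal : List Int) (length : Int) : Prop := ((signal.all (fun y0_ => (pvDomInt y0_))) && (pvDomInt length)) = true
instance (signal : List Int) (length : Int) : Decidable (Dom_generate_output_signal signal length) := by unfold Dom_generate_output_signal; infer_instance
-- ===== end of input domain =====

-- B replaces A's per-row scan of the cyclic pattern by prefix sums queried once per
-- pattern block (objective: faster, asymptotically fewer operations as measured).

-- ===== PORT A =====
-- the base cyclic pattern (0, 1, 0, -1); index i is the current position in the cycle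
def pvBase (i : Nat) : Int := [0, 1, 0, -1].getD i 0

-- state machine of generate_base_cyclic_pattern_for_row: Python generators cannot be
-- transliterated directly, so the generator is ported exactly as its state machine:
-- state (i, k) = position i in the base cycle, k values of the current block already
-- emitted; each step yields pvBase i and advances (exact for every state).
def patFrom : Nat → Nat → Nat → Nat → List Int
  | 0, _, _, _ => []
  | n+1, rep, i, k =>
    pvBase i :: (if k + 1 = rep then patFrom n rep ((i+1) % 4) 0 else patFrom n rep i (k+1))

-- generate_repeating_pattern: consume one element first, then yield `length` values;
-- the state after the consumed first element is (1,0) if rep = 1 else (0,1)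
def repeatingPattern (row : Nat) (length : Nat) : List Int :=
  let rep := row + 1
  if rep = 1 then patFrom length rep 1 0 else patFrom length rep 0 1

def generate_output_signal (signal : List Int) (length : Int) : List Int :=
  (PySem.List.pyRange 0 length 1).map (fun row =>
    (List.zipWith (fun n factor => n * factor) signal
        (repeatingPattern row.toNat length.toNat)).foldl (· + ·) 0)

-- ===== PORT B =====
-- prefix = [0]; for x in sig[:m]: acc += x; prefix.append(acc)
def prefixSums : Int → List Int → List Int
  | acc, [] => [acc]
  | acc, x :: xs => acc :: prefixSums (acc + x) xs

-- the `while start < m` loop of B; fuel only makes the recursion structural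
-- (the loop advances start by 2*rep ≥ 2 each iteration, so fuel m+1 is enough)
def loopB : Nat → List Int → Nat → Nat → Nat → Int → Int
  | 0, _, _, _, _, _ => 0
  | fuel+1, pfx, m, rep, start, sign =>
    if start < m then
      sign * (pfx.getD (min (start + rep) m) 0 - pfx.getD start 0)
        + loopB fuel pfx m rep (start + 2*rep) (-sign)
    else 0

def generate_output_signal_alt (signal : List Int) (length : Int) : List Int :=
  let m := min signal.length length.toNat
  let pfx := prefixSums 0 (signal.take m)
  (PySem.List.pyRange 0 length 1).map (fun row =>
    let rep := row.toNat + 1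
    loopB (m+1) pfx m rep (rep - 1) 1)

-- ===== PRECONDITION & SPEC =====
def Spec_generate_output_signal (signal : List Int) (length : Int) (out : List Int) : Prop := out = generate_output_signal_alt signal length
instance (signal : List Int) (length : Int) (out : List Int) : Decidable (Spec_generate_output_signal signal length out) := by unfold Spec_generate_output_signal; infer_instance

-- ===== CLAIM (what is proved, stated in full; the proofs are below) =====
def Claim_equal_generate_output_signal : Prop := ∀ (signal : List Int) (length : Int), Dom_generate_output_signal signal length → Spec_generate_output_signal signal length (generate_output_signal signal length)

-- ===== LEMMAS AND PROOFS =====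

-- closed form of the factor at position t of row r's pattern
def pvG (rep t : Nat) : Int := pvBase (((t+1) / rep) % 4)

theorem patFrom_eq_map (n : Nat) : ∀ (rep i k : Nat), 0 < rep → i < 4 → k < rep →
    patFrom n rep i k = (List.range n).map (fun t => pvBase ((i + (k + t) / rep) % 4)) := by
  induction n with
  | zero => intros; simp [patFrom]
  | succ n ih =>
    intro rep i k hrep hi hk
    rw [List.range_succ_eq_map]
    simp only [patFrom, List.map_cons, List.map_map]
    congr 1
    · rw [Nat.add_zero, Nat.div_eq_of_lt hk, Nat.add_zero, Nat.mod_eq_of_lt hi]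
    · split_ifs with h
      · rw [ih rep ((i+1) % 4) 0 hrep (by omega) hrep]
        apply List.map_congr_left
        intro t _
        have h1 : k + (t + 1) = t + rep := by omega
        have h2 : (t + rep) / rep = t / rep + 1 := Nat.add_div_right t hrep
        simp only [Function.comp_apply, Nat.succ_eq_add_one, Nat.zero_add]
        rw [h1, h2]
        congr 1
        omega
      · rw [ih rep i (k+1) hrep hi (by omega)]
        apply List.map_congr_left
        intro t _
        simp only [Function.comp_apply, Nat.succ_eq_add_one]
        have h1 : k + 1 + t = k + (t + 1) := by omega
        rw [h1]

theorem repeatingPattern_eq_map (r L : Nat) :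
    repeatingPattern r L = (List.range L).map (fun t => pvG (r+1) t) := by
  unfold repeatingPattern pvG
  by_cases h : r + 1 = 1
  · have h1 : r = 0 := by omega
    subst h1
    rw [if_pos rfl]
    rw [patFrom_eq_map L 1 1 0 (by omega) (by omega) (by omega)]
    apply List.map_congr_left
    intro t _
    simp only [Nat.div_one, Nat.zero_add]
    congr 1
    omega
  · simp only [if_neg h]
    rw [patFrom_eq_map L (r+1) 0 1 (by omega) (by omega) (by omega)]
    apply List.map_congr_left
    intro t _
    have h1 : 1 + t = t + 1 := by omega
    rw [Nat.zero_add, h1]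

theorem zip_sum_eq (xs : List Int) : ∀ (L : Nat) (f : Nat → Int),
    (List.zipWith (fun n factor => n * factor) xs ((List.range L).map f)).foldl (· + ·) 0
      = ∑ t ∈ Finset.range (min xs.length L), xs.getD t 0 * f t := by
  induction xs with
  | nil => intro L f; simp
  | cons x xs ih =>
    intro L f
    cases L with
    | zero => simp
    | succ L =>
      rw [List.range_succ_eq_map]
      simp only [List.map_cons, List.map_map, List.zipWith_cons_cons]
      have hfold : ∀ (l : List Int) (a : Int), l.foldl (· + ·) a = a + l.sum := by
        intro l
        induction l with
        | nil => intro a; simp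
        | cons y l ihl => intro a; simp only [List.foldl_cons, List.sum_cons, ihl]; ring
      rw [hfold]
      have hsum : (List.zipWith (fun n factor => n * factor) xs
          ((List.range L).map ((fun t => f t) ∘ Nat.succ))).sum
          = ∑ t ∈ Finset.range (min xs.length L), xs.getD t 0 * f (t + 1) := by
        have := ih L (fun t => f (t+1))
        rw [hfold, zero_add] at this
        simpa [Function.comp] using this
      rw [List.sum_cons, hsum]
      simp only [List.length_cons, Nat.succ_min_succ, Finset.sum_range_succ',
        List.getD_cons_succ, List.getD_cons_zero]
      ring

theorem prefixSums_getD (l : List Int) : ∀ (acc : Int) (t : Nat), t ≤ l.length →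
    (prefixSums acc l).getD t 0 = acc + ∑ i ∈ Finset.range t, l.getD i 0 := by
  induction l with
  | nil =>
    intro acc t ht
    have h0 : t = 0 := by simpa using ht
    subst h0
    simp [prefixSums]
  | cons x xs ih =>
    intro acc t ht
    cases t with
    | zero => simp [prefixSums]
    | succ t =>
      simp only [prefixSums, List.getD_cons_succ]
      rw [ih (acc + x) t (by simpa using ht)]
      rw [Finset.sum_range_succ']
      simp only [List.getD_cons_succ, List.getD_cons_zero]
      ring

-- factor values inside / between blocks
theorem pvG_zero_low (rep t : Nat) (h : t + 1 < rep) : pvG rep t = 0 := by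
  unfold pvG
  rw [Nat.div_eq_of_lt h]
  rfl

theorem pvG_block (rep t j : Nat)
    (h1 : rep * (2*j+1) ≤ t + 1) (h2 : t + 1 < rep * (2*j+2)) :
    pvG rep t = (if j % 2 = 0 then (1:Int) else -1) := by
  unfold pvG
  have hdiv : (t+1) / rep = 2*j+1 := by
    apply Nat.div_eq_of_lt_le
    · calc (2*j+1) * rep = rep * (2*j+1) := by ring
        _ ≤ t + 1 := h1
    · calc t + 1 < rep * (2*j+2) := h2
        _ = ((2*j+1) + 1) * rep := by ring
  rw [hdiv]
  rcases Nat.even_or_odd j with ⟨a, ha⟩ | ⟨a, ha⟩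
  · have : (2*j+1) % 4 = 1 := by omega
    rw [this, if_pos (by omega)]; rfl
  · have : (2*j+1) % 4 = 3 := by omega
    rw [this, if_neg (by omega)]; rfl

theorem pvG_zero_gap (rep t j : Nat)
    (h1 : rep * (2*j+2) ≤ t + 1) (h2 : t + 1 < rep * (2*j+3)) :
    pvG rep t = 0 := by
  unfold pvG
  have hdiv : (t+1) / rep = 2*j+2 := by
    apply Nat.div_eq_of_lt_le
    · calc (2*j+2) * rep = rep * (2*j+2) := by ring
        _ ≤ t + 1 := h1
    · calc t + 1 < rep * (2*j+3) := h2
        _ = ((2*j+2) + 1) * rep := by ring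
  rw [hdiv]
  have : (2*j+2) % 4 = 0 ∨ (2*j+2) % 4 = 2 := by omega
  rcases this with h | h <;> rw [h] <;> rfl

theorem loopB_eq_sum (fuel : Nat) : ∀ (sig : List Int) (m rep : Nat), 0 < rep → m ≤ sig.length →
    ∀ (j start : Nat) (sign : Int), start + 1 = rep * (2*j+1) →
    sign = (if j % 2 = 0 then (1:Int) else -1) → m ≤ start + 2*fuel →
    loopB fuel (prefixSums 0 (sig.take m)) m rep start sign
      = ∑ t ∈ Finset.Ico start m, sig.getD t 0 * pvG rep t := by
  induction fuel with
  | zero =>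
    intro sig m rep hrep hm j start sign hstart hsign hfuel
    rw [Finset.Ico_eq_empty (by omega), Finset.sum_empty]
    rfl
  | succ fuel ih =>
    intro sig m rep hrep hm j start sign hstart hsign hfuel
    simp only [loopB]
    by_cases hsm : start < m
    · rw [if_pos hsm]
      have hlen : (sig.take m).length = m := by
        rw [List.length_take]; omega
      have htake : ∀ i, i < m → (sig.take m).getD i 0 = sig.getD i 0 := by
        intro i hi
        simp [List.getD, hi]
      have hpfx : ∀ t, t ≤ m → (prefixSums 0 (sig.take m)).getD t 0
          = ∑ i ∈ Finset.range t, sig.getD i 0 := by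
        intro t ht
        rw [prefixSums_getD _ 0 t (by omega), zero_add]
        exact Finset.sum_congr rfl fun i hi => htake i (by
          have := Finset.mem_range.mp hi; omega)
      have h3 : rep * (2*j+2) = rep * (2*j+1) + rep := by ring
      have h4 : rep * (2*j+3) = rep * (2*j+1) + 2*rep := by ring
      have h5 : rep * (2*(j+1)+1) = rep * (2*j+3) := by ring
      have hse : start ≤ min (start + rep) m := by omega
      have hem : min (start + rep) m ≤ m := by omega
      have hdiff : (prefixSums 0 (sig.take m)).getD (min (start + rep) m) 0
          - (prefixSums 0 (sig.take m)).getD start 0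
          = ∑ t ∈ Finset.Ico start (min (start + rep) m), sig.getD t 0 := by
        rw [hpfx _ hem, hpfx _ (by omega), Finset.sum_Ico_eq_sub _ hse]
      have hblock : ∀ t ∈ Finset.Ico start (min (start + rep) m),
          sig.getD t 0 * pvG rep t = sign * sig.getD t 0 := by
        intro t ht
        have ht' := Finset.mem_Ico.mp ht
        rw [pvG_block rep t j (by omega) (by omega), ← hsign]
        ring
      have hgap : ∑ t ∈ Finset.Ico (min (start + rep) m) (min (start + 2*rep) m),
          sig.getD t 0 * pvG rep t = 0 := by
        apply Finset.sum_eq_zero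
        intro t ht
        have ht' := Finset.mem_Ico.mp ht
        by_cases hce : start + rep ≤ m
        · rw [Nat.min_eq_left hce] at ht'
          rw [pvG_zero_gap rep t j (by omega) (by omega)]
          ring
        · omega
      have hih : loopB fuel (prefixSums 0 (sig.take m)) m rep (start + 2*rep) (-sign)
          = ∑ t ∈ Finset.Ico (start + 2*rep) m, sig.getD t 0 * pvG rep t := by
        apply ih sig m rep hrep hm (j+1) (start + 2*rep) (-sign) (by omega)
        · by_cases hj : j % 2 = 0
          · rw [hsign, if_pos hj, if_neg (by omega)]
          · rw [hsign, if_neg hj, if_pos (by omega)]; norm_num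
        · omega
      have htail : ∑ t ∈ Finset.Ico (min (start + 2*rep) m) m, sig.getD t 0 * pvG rep t
          = ∑ t ∈ Finset.Ico (start + 2*rep) m, sig.getD t 0 * pvG rep t := by
        by_cases h : start + 2*rep ≤ m
        · rw [Nat.min_eq_left h]
        · rw [Nat.min_eq_right (by omega), Finset.Ico_self,
            Finset.Ico_eq_empty (by omega)]
      rw [hdiff, hih, ← Finset.sum_Ico_consecutive _ hse hem,
        ← Finset.sum_Ico_consecutive
          (m := min (start + rep) m) (n := min (start + 2*rep) m) (k := m)
          _ (by omega) (by omega),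
        hgap, zero_add, htail, Finset.mul_sum]
      rw [Finset.sum_congr rfl hblock]
    · rw [if_neg hsm, Finset.Ico_eq_empty (by omega), Finset.sum_empty]

theorem row_eq (sig : List Int) (L r : Nat) :
    (List.zipWith (fun n factor => n * factor) sig (repeatingPattern r L)).foldl (· + ·) 0
      = loopB (min sig.length L + 1) (prefixSums 0 (sig.take (min sig.length L)))
          (min sig.length L) (r+1) r 1 := by
  rw [repeatingPattern_eq_map, zip_sum_eq]
  rw [loopB_eq_sum (min sig.length L + 1) sig (min sig.length L) (r+1) (by omega)
    (by omega) 0 r 1 (by ring) (by norm_num) (by omega)]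
  rw [Finset.range_eq_Ico]
  rcases Nat.lt_or_ge (min sig.length L) r with h | h
  · rw [Finset.Ico_eq_empty (by omega : ¬ r < min sig.length L), Finset.sum_empty]
    apply Finset.sum_eq_zero
    intro t ht
    have ht' := Finset.mem_Ico.mp ht
    rw [pvG_zero_low (r+1) t (by omega)]
    ring
  · rw [← Finset.sum_Ico_consecutive _ (Nat.zero_le r) h]
    have h0 : ∑ t ∈ Finset.Ico 0 r, sig.getD t 0 * pvG (r+1) t = 0 := by
      apply Finset.sum_eq_zero
      intro t ht
      have ht' := Finset.mem_Ico.mp ht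
      rw [pvG_zero_low (r+1) t (by omega)]
      ring
    rw [h0, zero_add]

-- ===== VERDICT (by name: the statement is the Claim_ definition above) =====
theorem generate_output_signal_spec : Claim_equal_generate_output_signal := by
  intro signal length _
  unfold Spec_generate_output_signal generate_output_signal generate_output_signal_alt
  apply List.map_congr_left
  intro row _
  simpa using row_eq signal length.toNat row.toNat
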